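-- pv_equiv track=rewrite | github.com/KarmaHirrime/Colloscope_automatique | Bibli/calendrier.py | joursFeries
-- ===== SOURCE A (Python) =====
-- def convertDate(date):
--     """
--     Convertit une date format (j,m,a) en nombre de jours au 21ème siècle (1 jour au 1er janvier 2000)
--     """
--     day,month,year=date
--     daysByMonths=[31,28,31,30,31,30,31,31,30,31,30,31]
--     nbDaysCentury=(year-2000)*365+(year-2000)//4+1*(year>2000) + sum(daysByMonths[0:month-1])+(year%4==0 and month>2)+day
--     return nbDaysCentury
--
-- def reverseDate(nbDaysCentury):
--     """
--     Convertit un nombre de jours au 21ème siècle en date format numérique (j,m,a)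
--     """
--     daysByMonths=[31,28,31,30,31,30,31,31,30,31,30,31]
--     count=0
--     year=1999
--     while count<nbDaysCentury:
--         year+=1
--         count+=365+(year%4==0)
--     nbDaysCentury-=(year-2000)*365+(year-2000)//4+1*(year>2000)
--     count=0
--     month=0
--     if year%4==0:
--         daysByMonths[1]+=1
--     while count<nbDaysCentury:
--         count+=daysByMonths[month]
--         month+=1
--     nbDaysCentury-=sum(daysByMonths[0:month-1])
--     day=nbDaysCentury
--     return day,month,year
--
-- def datePaques(an):
--     """Calcule la date de Pâques d'une année donnée an (=nombre entier)"""
--     a=an//100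
--     b=an%100
--     c=(3*(a+25))//4
--     d=(3*(a+25))%4
--     e=(8*(a+11))//25
--     f=(5*a+b)%19
--     g=(19*f+c-e)%30
--     h=(f+11*g)//319
--     j=(60*(5-d)+b)//4
--     k=(60*(5-d)+b)%4
--     m=(2*j-k-g+h)%7
--     n=(g-h+m+114)//31
--     p=(g-h+m+114)%31
--     jour=p+1
--     mois=n
--     return jour, mois, an
--
-- def joursFeries(an):
--     """
--     Renvoie la liste de tous les jours feries de l'année "an" en format nb jours au 21eme siècle
--     """
--     paques=convertDate(datePaques(an))
--     lundiPaques=paques+1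
--     ascension=paques+39
--     pentecote=paques+50
--     nouvelAn=convertDate((1,1,an))
--     feteTravail=convertDate((1,5,an))
--     Armistice2=convertDate((8,5,an))
--     FeteNat=convertDate((14,7,an))
--     Assomption=convertDate((15,8,an))
--     Toussaint=convertDate((1,11,an))
--     Armistice1=convertDate((11,11,an))
--     Noel=convertDate((25,12,an))
--     L= sorted([lundiPaques,ascension,pentecote,nouvelAn,feteTravail,Armistice2,FeteNat,Assomption,Toussaint,Armistice1,Noel])
--     return [reverseDate(date) for date in L]
-- ===== SOURCE B (Python) =====
-- # B: closed-form O(1) inversion of the day-number encoding (one division for the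
-- # year, a prefix-sum table for month and day) instead of year-by-year and
-- # month-by-month counting loops.
--
-- # days elapsed before each month (index m-1 = days before month m)
-- PREF = (0, 31, 59, 90, 120, 151, 181, 212, 243, 273, 304, 334)
-- PREF_LEAP = (0, 31, 60, 91, 121, 152, 182, 213, 244, 274, 305, 335)
--
--
-- def _easter(an):
--     """Easter date of year an (Gauss-style formula)."""
--     a = an // 100
--     b = an % 100
--     c = (3 * (a + 25)) // 4
--     d = (3 * (a + 25)) % 4
--     e = (8 * (a + 11)) // 25
--     f = (5 * a + b) % 19
--     g = (19 * f + c - e) % 30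
--     h = (f + 11 * g) // 319
--     j = (60 * (5 - d) + b) // 4
--     k = (60 * (5 - d) + b) % 4
--     m = (2 * j - k - g + h) % 7
--     n = (g - h + m + 114) // 31
--     p = (g - h + m + 114) % 31
--     return p + 1, n, an
--
--
-- def _toNum(d, m, y):
--     """Day-number of (d, m, y): day 1 is 2000-01-01."""
--     return ((y - 2000) * 365 + (y - 2000) // 4 + (y > 2000)
--             + PREF[m - 1] + (y % 4 == 0 and m > 2) + d)
--
--
-- def _fromNum(x):
--     """Inverse of _toNum, in closed form: days <= 0 fall in 1999, the year
--     before the epoch; otherwise one division recovers the year."""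
--     year = 1999 if x <= 0 else 1999 + (4 * x + 1457) // 1461
--     r = x - ((year - 2000) * 365 + (year - 2000) // 4 + (year > 2000))
--     P = PREF_LEAP if year % 4 == 0 else PREF
--     month = sum(p < r for p in P)
--     return r - P[month - 1], month, year
--
--
-- def joursFeries(an):
--     jour, mois, _ = _easter(an)
--     paques = _toNum(jour, mois, an)
--     nums = sorted([paques + 1, paques + 39, paques + 50,
--                    _toNum(1, 1, an), _toNum(1, 5, an), _toNum(8, 5, an),
--                    _toNum(14, 7, an), _toNum(15, 8, an), _toNum(1, 11, an),
--                    _toNum(11, 11, an), _toNum(25, 12, an)])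
--     return [_fromNum(x) for x in nums]
-- ===== Notes on version B (the rewrite author's own statement) =====
-- stated objective: faster
-- what changed: Replaces reverseDate's year-by-year counting loop and month-by-month accumulation loop by a closed-form O(1) inversion: one division recovers the year, a prefix-sum month table recovers month and day.
import Mathlib
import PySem

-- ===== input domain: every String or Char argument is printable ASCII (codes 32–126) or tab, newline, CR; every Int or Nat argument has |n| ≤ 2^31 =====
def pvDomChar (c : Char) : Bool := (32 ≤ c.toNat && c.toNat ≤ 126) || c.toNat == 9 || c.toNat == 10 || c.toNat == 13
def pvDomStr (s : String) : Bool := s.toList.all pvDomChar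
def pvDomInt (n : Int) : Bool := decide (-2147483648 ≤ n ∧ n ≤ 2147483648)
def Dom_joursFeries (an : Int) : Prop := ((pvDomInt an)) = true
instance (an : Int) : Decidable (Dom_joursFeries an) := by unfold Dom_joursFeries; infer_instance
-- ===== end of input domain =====

-- B replaces A's year-by-year / month-by-month counting loops in reverseDate by a
-- closed-form O(1) inversion of the same day-number encoding (objective: faster).

-- ===== PORT A =====
def cdDaysByMonths : List Int := [31, 28, 31, 30, 31, 30, 31, 31, 30, 31, 30, 31]

def convertDate (date : Int × Int × Int) : Int :=
  match date with
  | (day, month, year) =>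
      (year - 2000) * 365 + PySem.Int.floordiv (year - 2000) 4 + (if year > 2000 then 1 else 0)
      + (PySem.List.slice cdDaysByMonths (some 0) (some (month - 1))).sum
      + (if PySem.Int.mod year 4 = 0 ∧ month > 2 then 1 else 0) + day

-- "while count < nbDaysCentury: year += 1; count += 365 + (year % 4 == 0)"
def rdLoop1 (n year count : Int) : Int :=
  if _h : count < n then
    rdLoop1 n (year + 1) (count + 365 + (if PySem.Int.mod (year + 1) 4 = 0 then 1 else 0))
  else year
termination_by (n - count).toNat
decreasing_by split <;> omega

-- "while count < nbDaysCentury: count += daysByMonths[month]; month += 1"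
-- (walks the month list structurally; on the [] branch Python would raise IndexError —
-- that branch is never reached by any call reverseDate makes inside joursFeries)
def rdLoop2 (n : Int) (rest : List Int) (month count : Int) : Int :=
  if count < n then
    match rest with
    | [] => month
    | v :: tl => rdLoop2 n tl (month + 1) (count + v)
  else month

def reverseDate (nb : Int) : Int × Int × Int :=
  let year := rdLoop1 nb 1999 0
  let n2 := nb - ((year - 2000) * 365 + PySem.Int.floordiv (year - 2000) 4 + (if year > 2000 then 1 else 0))
  -- "if year % 4 == 0: daysByMonths[1] += 1"  (ported as the resulting list)
  let dbm := if PySem.Int.mod year 4 = 0 then [31, 29, 31, 30, 31, 30, 31, 31, 30, 31, 30, 31] else cdDaysByMonths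
  let month := rdLoop2 n2 dbm 0 0
  let day := n2 - (PySem.List.slice dbm (some 0) (some (month - 1))).sum
  (day, month, year)

def datePaques (an : Int) : Int × Int × Int :=
  let a := PySem.Int.floordiv an 100
  let b := PySem.Int.mod an 100
  let c := PySem.Int.floordiv (3 * (a + 25)) 4
  let d := PySem.Int.mod (3 * (a + 25)) 4
  let e := PySem.Int.floordiv (8 * (a + 11)) 25
  let f := PySem.Int.mod (5 * a + b) 19
  let g := PySem.Int.mod (19 * f + c - e) 30
  let h := PySem.Int.floordiv (f + 11 * g) 319
  let j := PySem.Int.floordiv (60 * (5 - d) + b) 4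
  let k := PySem.Int.mod (60 * (5 - d) + b) 4
  let m := PySem.Int.mod (2 * j - k - g + h) 7
  let n := PySem.Int.floordiv (g - h + m + 114) 31
  let p := PySem.Int.mod (g - h + m + 114) 31
  (p + 1, n, an)

def joursFeries (an : Int) : List (Int × Int × Int) :=
  let paques := convertDate (datePaques an)
  let lundiPaques := paques + 1
  let ascension := paques + 39
  let pentecote := paques + 50
  let nouvelAn := convertDate (1, 1, an)
  let feteTravail := convertDate (1, 5, an)
  let armistice2 := convertDate (8, 5, an)
  let feteNat := convertDate (14, 7, an)
  let assomption := convertDate (15, 8, an)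
  let toussaint := convertDate (1, 11, an)
  let armistice1 := convertDate (11, 11, an)
  let noel := convertDate (25, 12, an)
  let L := PySem.List.sorted [lundiPaques, ascension, pentecote, nouvelAn, feteTravail,
      armistice2, feteNat, assomption, toussaint, armistice1, noel] (fun x => x) false
  L.map reverseDate

-- ===== PORT B =====
-- days elapsed before each month (index m-1 = days before month m)
def prefNonLeap : List Int := [0, 31, 59, 90, 120, 151, 181, 212, 243, 273, 304, 334]
def prefLeap : List Int := [0, 31, 60, 91, 121, 152, 182, 213, 244, 274, 305, 335]

-- Easter date (same Gauss-style formula as the source module uses)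
def easterB (an : Int) : Int × Int × Int :=
  let a := PySem.Int.floordiv an 100
  let b := PySem.Int.mod an 100
  let c := PySem.Int.floordiv (3 * (a + 25)) 4
  let d := PySem.Int.mod (3 * (a + 25)) 4
  let e := PySem.Int.floordiv (8 * (a + 11)) 25
  let f := PySem.Int.mod (5 * a + b) 19
  let g := PySem.Int.mod (19 * f + c - e) 30
  let h := PySem.Int.floordiv (f + 11 * g) 319
  let j := PySem.Int.floordiv (60 * (5 - d) + b) 4
  let k := PySem.Int.mod (60 * (5 - d) + b) 4
  let m := PySem.Int.mod (2 * j - k - g + h) 7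
  let n := PySem.Int.floordiv (g - h + m + 114) 31
  let p := PySem.Int.mod (g - h + m + 114) 31
  (p + 1, n, an)

-- day-number of (d, m, y); PREF[m-1] is in range on every call (1 ≤ m ≤ 12)
def toNumB (d m y : Int) : Int :=
  (y - 2000) * 365 + PySem.Int.floordiv (y - 2000) 4 + (if y > 2000 then 1 else 0)
    + PySem.List.pyGetD prefNonLeap (m - 1) 0
    + (if PySem.Int.mod y 4 = 0 ∧ m > 2 then 1 else 0) + d

-- closed-form inverse of toNumB: days ≤ 0 fall in 1999 (the year before the epoch),
-- otherwise one division recovers the year; month = count of prefix sums below r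
def fromNumB (x : Int) : Int × Int × Int :=
  let year := if x ≤ 0 then (1999 : Int) else 1999 + PySem.Int.floordiv (4 * x + 1457) 1461
  let r := x - ((year - 2000) * 365 + PySem.Int.floordiv (year - 2000) 4 + (if year > 2000 then 1 else 0))
  let P := if PySem.Int.mod year 4 = 0 then prefLeap else prefNonLeap
  let month : Int := (P.countP (fun p => decide (p < r)) : Nat)
  (r - PySem.List.pyGetD P (month - 1) 0, month, year)

def joursFeries_alt (an : Int) : List (Int × Int × Int) :=
  let jour := (easterB an).1
  let mois := (easterB an).2.1
  let paques := toNumB jour mois an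
  let nums := PySem.List.sorted [paques + 1, paques + 39, paques + 50, toNumB 1 1 an,
      toNumB 1 5 an, toNumB 8 5 an, toNumB 14 7 an, toNumB 15 8 an, toNumB 1 11 an,
      toNumB 11 11 an, toNumB 25 12 an] (fun x => x) false
  nums.map fromNumB

-- ===== PRECONDITION & SPEC =====
def Spec_joursFeries (an : Int) (out : List (Int × Int × Int)) : Prop := out = joursFeries_alt an
instance (an : Int) (out : List (Int × Int × Int)) : Decidable (Spec_joursFeries an out) := by unfold Spec_joursFeries; infer_instance

-- ===== CLAIM =====
def Claim_equal_joursFeries : Prop := ∀ (an : Int), Dom_joursFeries an → Spec_joursFeries an (joursFeries an)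

-- ===== LEMMAS AND PROOFS =====

/-- the value of A's `count` after the year loop has passed year `y` (`y ≥ 1999`). -/
def FY (y : Int) : Int := 365 * (y - 1999) + (y / 4 - 499)

/-- the year A's first loop stops at, in closed form. -/
def TY (n : Int) : Int := 1999 + max 0 (PySem.Int.floordiv (4 * n + 1457) 1461)

lemma fdiv1461 (n : Int) :
    1461 * PySem.Int.floordiv (4 * n + 1457) 1461 ≤ 4 * n + 1457 ∧
    4 * n + 1457 < 1461 * PySem.Int.floordiv (4 * n + 1457) 1461 + 1461 := by
  rw [PySem.Int.floordiv_eq_ediv_of_pos (by norm_num)]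
  omega

lemma TY_ge (n : Int) : 1999 ≤ TY n := by
  unfold TY
  have h' := le_max_left (0 : Int) (PySem.Int.floordiv (4 * n + 1457) 1461)
  omega

/-- B's year expression agrees with the clamped closed form. -/
lemma yearB_eq (n : Int) :
    (if n ≤ 0 then (1999 : Int) else 1999 + PySem.Int.floordiv (4 * n + 1457) 1461) = TY n := by
  have h := fdiv1461 n
  unfold TY
  split_ifs with h0
  · rw [max_eq_left (by omega)]; ring
  · rw [max_eq_right (by omega)]

lemma FY_TY_ge (n : Int) : n ≤ FY (TY n) := by
  have h := fdiv1461 n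
  unfold FY TY
  rcases le_total (PySem.Int.floordiv (4 * n + 1457) 1461) 0 with h0 | h0
  · rw [max_eq_left h0]; omega
  · rw [max_eq_right h0]; omega

lemma FY_lt (n y : Int) (h1 : 1999 ≤ y) (h2 : y < TY n) : FY y < n := by
  have h := fdiv1461 n
  unfold FY
  unfold TY at h2
  rcases le_total (PySem.Int.floordiv (4 * n + 1457) 1461) 0 with h0 | h0
  · rw [max_eq_left h0] at h2; omega
  · rw [max_eq_right h0] at h2; omega

lemma FY_succ (y : Int) : FY (y + 1) = FY y + 365 + (if PySem.Int.mod (y + 1) 4 = 0 then 1 else 0) := by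
  rw [PySem.Int.mod_eq_emod_of_pos (by norm_num)]
  unfold FY
  split_ifs with h <;> omega

lemma loop1_aux (n : Int) (fuel : Nat) : ∀ year count : Int,
    (TY n - year).toNat ≤ fuel → 1999 ≤ year → year ≤ TY n → count = FY year →
    rdLoop1 n year count = TY n := by
  induction fuel with
  | zero =>
    intro year count hf h1 h2 h3
    have hy : year = TY n := by omega
    subst hy
    have hnlt : ¬ count < n := by have := FY_TY_ge n; omega
    rw [rdLoop1, dif_neg hnlt]
  | succ kk ih =>
    intro year count hf h1 h2 h3
    rw [rdLoop1]
    by_cases hlt : count < n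
    · rw [dif_pos hlt]
      have hy : year < TY n := by
        rcases lt_or_eq_of_le h2 with h | h
        · exact h
        · exfalso; have := FY_TY_ge n; rw [← h] at this; omega
      exact ih (year + 1) _ (by omega) (by omega) (by omega)
        (by rw [h3]; exact (FY_succ year).symm)
    · rw [dif_neg hlt]
      by_contra hne
      have hy : year < TY n := lt_of_le_of_ne h2 hne
      have := FY_lt n year h1 hy
      omega

lemma loop1_eq (n : Int) : rdLoop1 n 1999 0 = TY n := by
  refine loop1_aux n (TY n - 1999).toNat 1999 0 le_rfl le_rfl (TY_ge n) ?_
  unfold FY; omega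

/-- month/day tail of A's reverseDate, as a function of the residual and the month list. -/
def tailsA (r : Int) (dbm : List Int) : Int × Int :=
  let month := rdLoop2 r dbm 0 0
  (r - (PySem.List.slice dbm (some 0) (some (month - 1))).sum, month)

/-- month/day tail of B's fromNumB, as a function of the residual and the prefix list. -/
def tailsB (r : Int) (P : List Int) : Int × Int :=
  let month : Int := (P.countP (fun p => decide (p < r)) : Nat)
  (r - PySem.List.pyGetD P (month - 1) 0, month)

lemma rdLoop2_step (n v : Int) (tl : List Int) (month count : Int) (h : count < n) :
    rdLoop2 n (v :: tl) month count = rdLoop2 n tl (month + 1) (count + v) := by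
  rw [rdLoop2, if_pos h]

lemma rdLoop2_stop (n : Int) (rest : List Int) (month count : Int) (h : ¬ count < n) :
    rdLoop2 n rest month count = month := by
  unfold rdLoop2
  rw [if_neg h]

lemma tails_nonleap (r : Int) (h1 : 0 < r) (h2 : r ≤ 365) :
    tailsA r cdDaysByMonths = tailsB r prefNonLeap := by
  unfold tailsA tailsB
  simp only [cdDaysByMonths, prefNonLeap]
  rcases (show (0 < r ∧ r ≤ 31) ∨ (31 < r ∧ r ≤ 59) ∨ (59 < r ∧ r ≤ 90) ∨ (90 < r ∧ r ≤ 120) ∨ (120 < r ∧ r ≤ 151) ∨ (151 < r ∧ r ≤ 181) ∨ (181 < r ∧ r ≤ 212) ∨ (212 < r ∧ r ≤ 243) ∨ (243 < r ∧ r ≤ 273) ∨ (273 < r ∧ r ≤ 304) ∨ (304 < r ∧ r ≤ 334) ∨ (334 < r ∧ r ≤ 365) from by omega) with h | h | h | h | h | h | h | h | h | h | h | h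
  · have hm : rdLoop2 r [31, 28, 31, 30, 31, 30, 31, 31, 30, 31, 30, 31] 0 0 = (1 : Int) := by
      rw [rdLoop2_step _ _ _ _ _ (by omega), rdLoop2_stop _ _ _ _ (by omega)]
      norm_num
    have hc : List.countP (fun p => decide (p < r)) ([0, 31, 59, 90, 120, 151, 181, 212, 243, 273, 304, 334] : List Int) = 1 := by
      simp only [List.countP_cons, List.countP_nil, decide_eq_true_eq]
      rw [if_pos (show (0:Int) < r by omega), if_neg (show ¬ ((31:Int) < r) by omega), if_neg (show ¬ ((59:Int) < r) by omega), if_neg (show ¬ ((90:Int) < r) by omega), if_neg (show ¬ ((120:Int) < r) by omega), if_neg (show ¬ ((151:Int) < r) by omega), if_neg (show ¬ ((181:Int) < r) by omega), if_neg (show ¬ ((212:Int) < r) by omega), if_neg (show ¬ ((243:Int) < r) by omega), if_neg (show ¬ ((273:Int) < r) by omega), if_neg (show ¬ ((304:Int) < r) by omega), if_neg (show ¬ ((334:Int) < r) by omega)]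
    simp only [hm, hc]
    rw [show (PySem.List.slice ([31, 28, 31, 30, 31, 30, 31, 31, 30, 31, 30, 31] : List Int) (some 0) (some ((1:Int) - 1))).sum = (0:Int) from by decide,
      show PySem.List.pyGetD ([0, 31, 59, 90, 120, 151, 181, 212, 243, 273, 304, 334] : List Int) (((1:Nat):Int) - 1) 0 = (0:Int) from by decide]
    norm_num
  · have hm : rdLoop2 r [31, 28, 31, 30, 31, 30, 31, 31, 30, 31, 30, 31] 0 0 = (2 : Int) := by
      rw [rdLoop2_step _ _ _ _ _ (by omega), rdLoop2_step _ _ _ _ _ (by omega), rdLoop2_stop _ _ _ _ (by omega)]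
      norm_num
    have hc : List.countP (fun p => decide (p < r)) ([0, 31, 59, 90, 120, 151, 181, 212, 243, 273, 304, 334] : List Int) = 2 := by
      simp only [List.countP_cons, List.countP_nil, decide_eq_true_eq]
      rw [if_pos (show (0:Int) < r by omega), if_pos (show (31:Int) < r by omega), if_neg (show ¬ ((59:Int) < r) by omega), if_neg (show ¬ ((90:Int) < r) by omega), if_neg (show ¬ ((120:Int) < r) by omega), if_neg (show ¬ ((151:Int) < r) by omega), if_neg (show ¬ ((181:Int) < r) by omega), if_neg (show ¬ ((212:Int) < r) by omega), if_neg (show ¬ ((243:Int) < r) by omega), if_neg (show ¬ ((273:Int) < r) by omega), if_neg (show ¬ ((304:Int) < r) by omega), if_neg (show ¬ ((334:Int) < r) by omega)]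
    simp only [hm, hc]
    rw [show (PySem.List.slice ([31, 28, 31, 30, 31, 30, 31, 31, 30, 31, 30, 31] : List Int) (some 0) (some ((2:Int) - 1))).sum = (31:Int) from by decide,
      show PySem.List.pyGetD ([0, 31, 59, 90, 120, 151, 181, 212, 243, 273, 304, 334] : List Int) (((2:Nat):Int) - 1) 0 = (31:Int) from by decide]
    norm_num
  · have hm : rdLoop2 r [31, 28, 31, 30, 31, 30, 31, 31, 30, 31, 30, 31] 0 0 = (3 : Int) := by
      rw [rdLoop2_step _ _ _ _ _ (by omega), rdLoop2_step _ _ _ _ _ (by omega), rdLoop2_step _ _ _ _ _ (by omega), rdLoop2_stop _ _ _ _ (by omega)]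
      norm_num
    have hc : List.countP (fun p => decide (p < r)) ([0, 31, 59, 90, 120, 151, 181, 212, 243, 273, 304, 334] : List Int) = 3 := by
      simp only [List.countP_cons, List.countP_nil, decide_eq_true_eq]
      rw [if_pos (show (0:Int) < r by omega), if_pos (show (31:Int) < r by omega), if_pos (show (59:Int) < r by omega), if_neg (show ¬ ((90:Int) < r) by omega), if_neg (show ¬ ((120:Int) < r) by omega), if_neg (show ¬ ((151:Int) < r) by omega), if_neg (show ¬ ((181:Int) < r) by omega), if_neg (show ¬ ((212:Int) < r) by omega), if_neg (show ¬ ((243:Int) < r) by omega), if_neg (show ¬ ((273:Int) < r) by omega), if_neg (show ¬ ((304:Int) < r) by omega), if_neg (show ¬ ((334:Int) < r) by omega)]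
    simp only [hm, hc]
    rw [show (PySem.List.slice ([31, 28, 31, 30, 31, 30, 31, 31, 30, 31, 30, 31] : List Int) (some 0) (some ((3:Int) - 1))).sum = (59:Int) from by decide,
      show PySem.List.pyGetD ([0, 31, 59, 90, 120, 151, 181, 212, 243, 273, 304, 334] : List Int) (((3:Nat):Int) - 1) 0 = (59:Int) from by decide]
    norm_num
  · have hm : rdLoop2 r [31, 28, 31, 30, 31, 30, 31, 31, 30, 31, 30, 31] 0 0 = (4 : Int) := by
      rw [rdLoop2_step _ _ _ _ _ (by omega), rdLoop2_step _ _ _ _ _ (by omega), rdLoop2_step _ _ _ _ _ (by omega), rdLoop2_step _ _ _ _ _ (by omega), rdLoop2_stop _ _ _ _ (by omega)]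
      norm_num
    have hc : List.countP (fun p => decide (p < r)) ([0, 31, 59, 90, 120, 151, 181, 212, 243, 273, 304, 334] : List Int) = 4 := by
      simp only [List.countP_cons, List.countP_nil, decide_eq_true_eq]
      rw [if_pos (show (0:Int) < r by omega), if_pos (show (31:Int) < r by omega), if_pos (show (59:Int) < r by omega), if_pos (show (90:Int) < r by omega), if_neg (show ¬ ((120:Int) < r) by omega), if_neg (show ¬ ((151:Int) < r) by omega), if_neg (show ¬ ((181:Int) < r) by omega), if_neg (show ¬ ((212:Int) < r) by omega), if_neg (show ¬ ((243:Int) < r) by omega), if_neg (show ¬ ((273:Int) < r) by omega), if_neg (show ¬ ((304:Int) < r) by omega), if_neg (show ¬ ((334:Int) < r) by omega)]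
    simp only [hm, hc]
    rw [show (PySem.List.slice ([31, 28, 31, 30, 31, 30, 31, 31, 30, 31, 30, 31] : List Int) (some 0) (some ((4:Int) - 1))).sum = (90:Int) from by decide,
      show PySem.List.pyGetD ([0, 31, 59, 90, 120, 151, 181, 212, 243, 273, 304, 334] : List Int) (((4:Nat):Int) - 1) 0 = (90:Int) from by decide]
    norm_num
  · have hm : rdLoop2 r [31, 28, 31, 30, 31, 30, 31, 31, 30, 31, 30, 31] 0 0 = (5 : Int) := by
      rw [rdLoop2_step _ _ _ _ _ (by omega), rdLoop2_step _ _ _ _ _ (by omega), rdLoop2_step _ _ _ _ _ (by omega), rdLoop2_step _ _ _ _ _ (by omega), rdLoop2_step _ _ _ _ _ (by omega), rdLoop2_stop _ _ _ _ (by omega)]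
      norm_num
    have hc : List.countP (fun p => decide (p < r)) ([0, 31, 59, 90, 120, 151, 181, 212, 243, 273, 304, 334] : List Int) = 5 := by
      simp only [List.countP_cons, List.countP_nil, decide_eq_true_eq]
      rw [if_pos (show (0:Int) < r by omega), if_pos (show (31:Int) < r by omega), if_pos (show (59:Int) < r by omega), if_pos (show (90:Int) < r by omega), if_pos (show (120:Int) < r by omega), if_neg (show ¬ ((151:Int) < r) by omega), if_neg (show ¬ ((181:Int) < r) by omega), if_neg (show ¬ ((212:Int) < r) by omega), if_neg (show ¬ ((243:Int) < r) by omega), if_neg (show ¬ ((273:Int) < r) by omega), if_neg (show ¬ ((304:Int) < r) by omega), if_neg (show ¬ ((334:Int) < r) by omega)]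
    simp only [hm, hc]
    rw [show (PySem.List.slice ([31, 28, 31, 30, 31, 30, 31, 31, 30, 31, 30, 31] : List Int) (some 0) (some ((5:Int) - 1))).sum = (120:Int) from by decide,
      show PySem.List.pyGetD ([0, 31, 59, 90, 120, 151, 181, 212, 243, 273, 304, 334] : List Int) (((5:Nat):Int) - 1) 0 = (120:Int) from by decide]
    norm_num
  · have hm : rdLoop2 r [31, 28, 31, 30, 31, 30, 31, 31, 30, 31, 30, 31] 0 0 = (6 : Int) := by
      rw [rdLoop2_step _ _ _ _ _ (by omega), rdLoop2_step _ _ _ _ _ (by omega), rdLoop2_step _ _ _ _ _ (by omega), rdLoop2_step _ _ _ _ _ (by omega), rdLoop2_step _ _ _ _ _ (by omega), rdLoop2_step _ _ _ _ _ (by omega), rdLoop2_stop _ _ _ _ (by omega)]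
      norm_num
    have hc : List.countP (fun p => decide (p < r)) ([0, 31, 59, 90, 120, 151, 181, 212, 243, 273, 304, 334] : List Int) = 6 := by
      simp only [List.countP_cons, List.countP_nil, decide_eq_true_eq]
      rw [if_pos (show (0:Int) < r by omega), if_pos (show (31:Int) < r by omega), if_pos (show (59:Int) < r by omega), if_pos (show (90:Int) < r by omega), if_pos (show (120:Int) < r by omega), if_pos (show (151:Int) < r by omega), if_neg (show ¬ ((181:Int) < r) by omega), if_neg (show ¬ ((212:Int) < r) by omega), if_neg (show ¬ ((243:Int) < r) by omega), if_neg (show ¬ ((273:Int) < r) by omega), if_neg (show ¬ ((304:Int) < r) by omega), if_neg (show ¬ ((334:Int) < r) by omega)]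
    simp only [hm, hc]
    rw [show (PySem.List.slice ([31, 28, 31, 30, 31, 30, 31, 31, 30, 31, 30, 31] : List Int) (some 0) (some ((6:Int) - 1))).sum = (151:Int) from by decide,
      show PySem.List.pyGetD ([0, 31, 59, 90, 120, 151, 181, 212, 243, 273, 304, 334] : List Int) (((6:Nat):Int) - 1) 0 = (151:Int) from by decide]
    norm_num
  · have hm : rdLoop2 r [31, 28, 31, 30, 31, 30, 31, 31, 30, 31, 30, 31] 0 0 = (7 : Int) := by
      rw [rdLoop2_step _ _ _ _ _ (by omega), rdLoop2_step _ _ _ _ _ (by omega), rdLoop2_step _ _ _ _ _ (by omega), rdLoop2_step _ _ _ _ _ (by omega), rdLoop2_step _ _ _ _ _ (by omega), rdLoop2_step _ _ _ _ _ (by omega), rdLoop2_step _ _ _ _ _ (by omega), rdLoop2_stop _ _ _ _ (by omega)]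
      norm_num
    have hc : List.countP (fun p => decide (p < r)) ([0, 31, 59, 90, 120, 151, 181, 212, 243, 273, 304, 334] : List Int) = 7 := by
      simp only [List.countP_cons, List.countP_nil, decide_eq_true_eq]
      rw [if_pos (show (0:Int) < r by omega), if_pos (show (31:Int) < r by omega), if_pos (show (59:Int) < r by omega), if_pos (show (90:Int) < r by omega), if_pos (show (120:Int) < r by omega), if_pos (show (151:Int) < r by omega), if_pos (show (181:Int) < r by omega), if_neg (show ¬ ((212:Int) < r) by omega), if_neg (show ¬ ((243:Int) < r) by omega), if_neg (show ¬ ((273:Int) < r) by omega), if_neg (show ¬ ((304:Int) < r) by omega), if_neg (show ¬ ((334:Int) < r) by omega)]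
    simp only [hm, hc]
    rw [show (PySem.List.slice ([31, 28, 31, 30, 31, 30, 31, 31, 30, 31, 30, 31] : List Int) (some 0) (some ((7:Int) - 1))).sum = (181:Int) from by decide,
      show PySem.List.pyGetD ([0, 31, 59, 90, 120, 151, 181, 212, 243, 273, 304, 334] : List Int) (((7:Nat):Int) - 1) 0 = (181:Int) from by decide]
    norm_num
  · have hm : rdLoop2 r [31, 28, 31, 30, 31, 30, 31, 31, 30, 31, 30, 31] 0 0 = (8 : Int) := by
      rw [rdLoop2_step _ _ _ _ _ (by omega), rdLoop2_step _ _ _ _ _ (by omega), rdLoop2_step _ _ _ _ _ (by omega), rdLoop2_step _ _ _ _ _ (by omega), rdLoop2_step _ _ _ _ _ (by omega), rdLoop2_step _ _ _ _ _ (by omega), rdLoop2_step _ _ _ _ _ (by omega), rdLoop2_step _ _ _ _ _ (by omega), rdLoop2_stop _ _ _ _ (by omega)]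
      norm_num
    have hc : List.countP (fun p => decide (p < r)) ([0, 31, 59, 90, 120, 151, 181, 212, 243, 273, 304, 334] : List Int) = 8 := by
      simp only [List.countP_cons, List.countP_nil, decide_eq_true_eq]
      rw [if_pos (show (0:Int) < r by omega), if_pos (show (31:Int) < r by omega), if_pos (show (59:Int) < r by omega), if_pos (show (90:Int) < r by omega), if_pos (show (120:Int) < r by omega), if_pos (show (151:Int) < r by omega), if_pos (show (181:Int) < r by omega), if_pos (show (212:Int) < r by omega), if_neg (show ¬ ((243:Int) < r) by omega), if_neg (show ¬ ((273:Int) < r) by omega), if_neg (show ¬ ((304:Int) < r) by omega), if_neg (show ¬ ((334:Int) < r) by omega)]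
    simp only [hm, hc]
    rw [show (PySem.List.slice ([31, 28, 31, 30, 31, 30, 31, 31, 30, 31, 30, 31] : List Int) (some 0) (some ((8:Int) - 1))).sum = (212:Int) from by decide,
      show PySem.List.pyGetD ([0, 31, 59, 90, 120, 151, 181, 212, 243, 273, 304, 334] : List Int) (((8:Nat):Int) - 1) 0 = (212:Int) from by decide]
    norm_num
  · have hm : rdLoop2 r [31, 28, 31, 30, 31, 30, 31, 31, 30, 31, 30, 31] 0 0 = (9 : Int) := by
      rw [rdLoop2_step _ _ _ _ _ (by omega), rdLoop2_step _ _ _ _ _ (by omega), rdLoop2_step _ _ _ _ _ (by omega), rdLoop2_step _ _ _ _ _ (by omega), rdLoop2_step _ _ _ _ _ (by omega), rdLoop2_step _ _ _ _ _ (by omega), rdLoop2_step _ _ _ _ _ (by omega), rdLoop2_step _ _ _ _ _ (by omega), rdLoop2_step _ _ _ _ _ (by omega), rdLoop2_stop _ _ _ _ (by omega)]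
      norm_num
    have hc : List.countP (fun p => decide (p < r)) ([0, 31, 59, 90, 120, 151, 181, 212, 243, 273, 304, 334] : List Int) = 9 := by
      simp only [List.countP_cons, List.countP_nil, decide_eq_true_eq]
      rw [if_pos (show (0:Int) < r by omega), if_pos (show (31:Int) < r by omega), if_pos (show (59:Int) < r by omega), if_pos (show (90:Int) < r by omega), if_pos (show (120:Int) < r by omega), if_pos (show (151:Int) < r by omega), if_pos (show (181:Int) < r by omega), if_pos (show (212:Int) < r by omega), if_pos (show (243:Int) < r by omega), if_neg (show ¬ ((273:Int) < r) by omega), if_neg (show ¬ ((304:Int) < r) by omega), if_neg (show ¬ ((334:Int) < r) by omega)]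
    simp only [hm, hc]
    rw [show (PySem.List.slice ([31, 28, 31, 30, 31, 30, 31, 31, 30, 31, 30, 31] : List Int) (some 0) (some ((9:Int) - 1))).sum = (243:Int) from by decide,
      show PySem.List.pyGetD ([0, 31, 59, 90, 120, 151, 181, 212, 243, 273, 304, 334] : List Int) (((9:Nat):Int) - 1) 0 = (243:Int) from by decide]
    norm_num
  · have hm : rdLoop2 r [31, 28, 31, 30, 31, 30, 31, 31, 30, 31, 30, 31] 0 0 = (10 : Int) := by
      rw [rdLoop2_step _ _ _ _ _ (by omega), rdLoop2_step _ _ _ _ _ (by omega), rdLoop2_step _ _ _ _ _ (by omega), rdLoop2_step _ _ _ _ _ (by omega), rdLoop2_step _ _ _ _ _ (by omega), rdLoop2_step _ _ _ _ _ (by omega), rdLoop2_step _ _ _ _ _ (by omega), rdLoop2_step _ _ _ _ _ (by omega), rdLoop2_step _ _ _ _ _ (by omega), rdLoop2_step _ _ _ _ _ (by omega), rdLoop2_stop _ _ _ _ (by omega)]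
      norm_num
    have hc : List.countP (fun p => decide (p < r)) ([0, 31, 59, 90, 120, 151, 181, 212, 243, 273, 304, 334] : List Int) = 10 := by
      simp only [List.countP_cons, List.countP_nil, decide_eq_true_eq]
      rw [if_pos (show (0:Int) < r by omega), if_pos (show (31:Int) < r by omega), if_pos (show (59:Int) < r by omega), if_pos (show (90:Int) < r by omega), if_pos (show (120:Int) < r by omega), if_pos (show (151:Int) < r by omega), if_pos (show (181:Int) < r by omega), if_pos (show (212:Int) < r by omega), if_pos (show (243:Int) < r by omega), if_pos (show (273:Int) < r by omega), if_neg (show ¬ ((304:Int) < r) by omega), if_neg (show ¬ ((334:Int) < r) by omega)]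
    simp only [hm, hc]
    rw [show (PySem.List.slice ([31, 28, 31, 30, 31, 30, 31, 31, 30, 31, 30, 31] : List Int) (some 0) (some ((10:Int) - 1))).sum = (273:Int) from by decide,
      show PySem.List.pyGetD ([0, 31, 59, 90, 120, 151, 181, 212, 243, 273, 304, 334] : List Int) (((10:Nat):Int) - 1) 0 = (273:Int) from by decide]
    norm_num
  · have hm : rdLoop2 r [31, 28, 31, 30, 31, 30, 31, 31, 30, 31, 30, 31] 0 0 = (11 : Int) := by
      rw [rdLoop2_step _ _ _ _ _ (by omega), rdLoop2_step _ _ _ _ _ (by omega), rdLoop2_step _ _ _ _ _ (by omega), rdLoop2_step _ _ _ _ _ (by omega), rdLoop2_step _ _ _ _ _ (by omega), rdLoop2_step _ _ _ _ _ (by omega), rdLoop2_step _ _ _ _ _ (by omega), rdLoop2_step _ _ _ _ _ (by omega), rdLoop2_step _ _ _ _ _ (by omega), rdLoop2_step _ _ _ _ _ (by omega), rdLoop2_step _ _ _ _ _ (by omega), rdLoop2_stop _ _ _ _ (by omega)]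
      norm_num
    have hc : List.countP (fun p => decide (p < r)) ([0, 31, 59, 90, 120, 151, 181, 212, 243, 273, 304, 334] : List Int) = 11 := by
      simp only [List.countP_cons, List.countP_nil, decide_eq_true_eq]
      rw [if_pos (show (0:Int) < r by omega), if_pos (show (31:Int) < r by omega), if_pos (show (59:Int) < r by omega), if_pos (show (90:Int) < r by omega), if_pos (show (120:Int) < r by omega), if_pos (show (151:Int) < r by omega), if_pos (show (181:Int) < r by omega), if_pos (show (212:Int) < r by omega), if_pos (show (243:Int) < r by omega), if_pos (show (273:Int) < r by omega), if_pos (show (304:Int) < r by omega), if_neg (show ¬ ((334:Int) < r) by omega)]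
    simp only [hm, hc]
    rw [show (PySem.List.slice ([31, 28, 31, 30, 31, 30, 31, 31, 30, 31, 30, 31] : List Int) (some 0) (some ((11:Int) - 1))).sum = (304:Int) from by decide,
      show PySem.List.pyGetD ([0, 31, 59, 90, 120, 151, 181, 212, 243, 273, 304, 334] : List Int) (((11:Nat):Int) - 1) 0 = (304:Int) from by decide]
    norm_num
  · have hm : rdLoop2 r [31, 28, 31, 30, 31, 30, 31, 31, 30, 31, 30, 31] 0 0 = (12 : Int) := by
      rw [rdLoop2_step _ _ _ _ _ (by omega), rdLoop2_step _ _ _ _ _ (by omega), rdLoop2_step _ _ _ _ _ (by omega), rdLoop2_step _ _ _ _ _ (by omega), rdLoop2_step _ _ _ _ _ (by omega), rdLoop2_step _ _ _ _ _ (by omega), rdLoop2_step _ _ _ _ _ (by omega), rdLoop2_step _ _ _ _ _ (by omega), rdLoop2_step _ _ _ _ _ (by omega), rdLoop2_step _ _ _ _ _ (by omega), rdLoop2_step _ _ _ _ _ (by omega), rdLoop2_step _ _ _ _ _ (by omega), rdLoop2_stop _ _ _ _ (by omega)]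
      norm_num
    have hc : List.countP (fun p => decide (p < r)) ([0, 31, 59, 90, 120, 151, 181, 212, 243, 273, 304, 334] : List Int) = 12 := by
      simp only [List.countP_cons, List.countP_nil, decide_eq_true_eq]
      rw [if_pos (show (0:Int) < r by omega), if_pos (show (31:Int) < r by omega), if_pos (show (59:Int) < r by omega), if_pos (show (90:Int) < r by omega), if_pos (show (120:Int) < r by omega), if_pos (show (151:Int) < r by omega), if_pos (show (181:Int) < r by omega), if_pos (show (212:Int) < r by omega), if_pos (show (243:Int) < r by omega), if_pos (show (273:Int) < r by omega), if_pos (show (304:Int) < r by omega), if_pos (show (334:Int) < r by omega)]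
    simp only [hm, hc]
    rw [show (PySem.List.slice ([31, 28, 31, 30, 31, 30, 31, 31, 30, 31, 30, 31] : List Int) (some 0) (some ((12:Int) - 1))).sum = (334:Int) from by decide,
      show PySem.List.pyGetD ([0, 31, 59, 90, 120, 151, 181, 212, 243, 273, 304, 334] : List Int) (((12:Nat):Int) - 1) 0 = (334:Int) from by decide]
    norm_num

lemma tails_leap (r : Int) (h1 : 0 < r) (h2 : r ≤ 366) :
    tailsA r [31, 29, 31, 30, 31, 30, 31, 31, 30, 31, 30, 31] = tailsB r prefLeap := by
  unfold tailsA tailsB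
  simp only [prefLeap]
  rcases (show (0 < r ∧ r ≤ 31) ∨ (31 < r ∧ r ≤ 60) ∨ (60 < r ∧ r ≤ 91) ∨ (91 < r ∧ r ≤ 121) ∨ (121 < r ∧ r ≤ 152) ∨ (152 < r ∧ r ≤ 182) ∨ (182 < r ∧ r ≤ 213) ∨ (213 < r ∧ r ≤ 244) ∨ (244 < r ∧ r ≤ 274) ∨ (274 < r ∧ r ≤ 305) ∨ (305 < r ∧ r ≤ 335) ∨ (335 < r ∧ r ≤ 366) from by omega) with h | h | h | h | h | h | h | h | h | h | h | h
  · have hm : rdLoop2 r [31, 29, 31, 30, 31, 30, 31, 31, 30, 31, 30, 31] 0 0 = (1 : Int) := by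
      rw [rdLoop2_step _ _ _ _ _ (by omega), rdLoop2_stop _ _ _ _ (by omega)]
      norm_num
    have hc : List.countP (fun p => decide (p < r)) ([0, 31, 60, 91, 121, 152, 182, 213, 244, 274, 305, 335] : List Int) = 1 := by
      simp only [List.countP_cons, List.countP_nil, decide_eq_true_eq]
      rw [if_pos (show (0:Int) < r by omega), if_neg (show ¬ ((31:Int) < r) by omega), if_neg (show ¬ ((60:Int) < r) by omega), if_neg (show ¬ ((91:Int) < r) by omega), if_neg (show ¬ ((121:Int) < r) by omega), if_neg (show ¬ ((152:Int) < r) by omega), if_neg (show ¬ ((182:Int) < r) by omega), if_neg (show ¬ ((213:Int) < r) by omega), if_neg (show ¬ ((244:Int) < r) by omega), if_neg (show ¬ ((274:Int) < r) by omega), if_neg (show ¬ ((305:Int) < r) by omega), if_neg (show ¬ ((335:Int) < r) by omega)]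
    simp only [hm, hc]
    rw [show (PySem.List.slice ([31, 29, 31, 30, 31, 30, 31, 31, 30, 31, 30, 31] : List Int) (some 0) (some ((1:Int) - 1))).sum = (0:Int) from by decide,
      show PySem.List.pyGetD ([0, 31, 60, 91, 121, 152, 182, 213, 244, 274, 305, 335] : List Int) (((1:Nat):Int) - 1) 0 = (0:Int) from by decide]
    norm_num
  · have hm : rdLoop2 r [31, 29, 31, 30, 31, 30, 31, 31, 30, 31, 30, 31] 0 0 = (2 : Int) := by
      rw [rdLoop2_step _ _ _ _ _ (by omega), rdLoop2_step _ _ _ _ _ (by omega), rdLoop2_stop _ _ _ _ (by omega)]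
      norm_num
    have hc : List.countP (fun p => decide (p < r)) ([0, 31, 60, 91, 121, 152, 182, 213, 244, 274, 305, 335] : List Int) = 2 := by
      simp only [List.countP_cons, List.countP_nil, decide_eq_true_eq]
      rw [if_pos (show (0:Int) < r by omega), if_pos (show (31:Int) < r by omega), if_neg (show ¬ ((60:Int) < r) by omega), if_neg (show ¬ ((91:Int) < r) by omega), if_neg (show ¬ ((121:Int) < r) by omega), if_neg (show ¬ ((152:Int) < r) by omega), if_neg (show ¬ ((182:Int) < r) by omega), if_neg (show ¬ ((213:Int) < r) by omega), if_neg (show ¬ ((244:Int) < r) by omega), if_neg (show ¬ ((274:Int) < r) by omega), if_neg (show ¬ ((305:Int) < r) by omega), if_neg (show ¬ ((335:Int) < r) by omega)]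
    simp only [hm, hc]
    rw [show (PySem.List.slice ([31, 29, 31, 30, 31, 30, 31, 31, 30, 31, 30, 31] : List Int) (some 0) (some ((2:Int) - 1))).sum = (31:Int) from by decide,
      show PySem.List.pyGetD ([0, 31, 60, 91, 121, 152, 182, 213, 244, 274, 305, 335] : List Int) (((2:Nat):Int) - 1) 0 = (31:Int) from by decide]
    norm_num
  · have hm : rdLoop2 r [31, 29, 31, 30, 31, 30, 31, 31, 30, 31, 30, 31] 0 0 = (3 : Int) := by
      rw [rdLoop2_step _ _ _ _ _ (by omega), rdLoop2_step _ _ _ _ _ (by omega), rdLoop2_step _ _ _ _ _ (by omega), rdLoop2_stop _ _ _ _ (by omega)]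
      norm_num
    have hc : List.countP (fun p => decide (p < r)) ([0, 31, 60, 91, 121, 152, 182, 213, 244, 274, 305, 335] : List Int) = 3 := by
      simp only [List.countP_cons, List.countP_nil, decide_eq_true_eq]
      rw [if_pos (show (0:Int) < r by omega), if_pos (show (31:Int) < r by omega), if_pos (show (60:Int) < r by omega), if_neg (show ¬ ((91:Int) < r) by omega), if_neg (show ¬ ((121:Int) < r) by omega), if_neg (show ¬ ((152:Int) < r) by omega), if_neg (show ¬ ((182:Int) < r) by omega), if_neg (show ¬ ((213:Int) < r) by omega), if_neg (show ¬ ((244:Int) < r) by omega), if_neg (show ¬ ((274:Int) < r) by omega), if_neg (show ¬ ((305:Int) < r) by omega), if_neg (show ¬ ((335:Int) < r) by omega)]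
    simp only [hm, hc]
    rw [show (PySem.List.slice ([31, 29, 31, 30, 31, 30, 31, 31, 30, 31, 30, 31] : List Int) (some 0) (some ((3:Int) - 1))).sum = (60:Int) from by decide,
      show PySem.List.pyGetD ([0, 31, 60, 91, 121, 152, 182, 213, 244, 274, 305, 335] : List Int) (((3:Nat):Int) - 1) 0 = (60:Int) from by decide]
    norm_num
  · have hm : rdLoop2 r [31, 29, 31, 30, 31, 30, 31, 31, 30, 31, 30, 31] 0 0 = (4 : Int) := by
      rw [rdLoop2_step _ _ _ _ _ (by omega), rdLoop2_step _ _ _ _ _ (by omega), rdLoop2_step _ _ _ _ _ (by omega), rdLoop2_step _ _ _ _ _ (by omega), rdLoop2_stop _ _ _ _ (by omega)]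
      norm_num
    have hc : List.countP (fun p => decide (p < r)) ([0, 31, 60, 91, 121, 152, 182, 213, 244, 274, 305, 335] : List Int) = 4 := by
      simp only [List.countP_cons, List.countP_nil, decide_eq_true_eq]
      rw [if_pos (show (0:Int) < r by omega), if_pos (show (31:Int) < r by omega), if_pos (show (60:Int) < r by omega), if_pos (show (91:Int) < r by omega), if_neg (show ¬ ((121:Int) < r) by omega), if_neg (show ¬ ((152:Int) < r) by omega), if_neg (show ¬ ((182:Int) < r) by omega), if_neg (show ¬ ((213:Int) < r) by omega), if_neg (show ¬ ((244:Int) < r) by omega), if_neg (show ¬ ((274:Int) < r) by omega), if_neg (show ¬ ((305:Int) < r) by omega), if_neg (show ¬ ((335:Int) < r) by omega)]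
    simp only [hm, hc]
    rw [show (PySem.List.slice ([31, 29, 31, 30, 31, 30, 31, 31, 30, 31, 30, 31] : List Int) (some 0) (some ((4:Int) - 1))).sum = (91:Int) from by decide,
      show PySem.List.pyGetD ([0, 31, 60, 91, 121, 152, 182, 213, 244, 274, 305, 335] : List Int) (((4:Nat):Int) - 1) 0 = (91:Int) from by decide]
    norm_num
  · have hm : rdLoop2 r [31, 29, 31, 30, 31, 30, 31, 31, 30, 31, 30, 31] 0 0 = (5 : Int) := by
      rw [rdLoop2_step _ _ _ _ _ (by omega), rdLoop2_step _ _ _ _ _ (by omega), rdLoop2_step _ _ _ _ _ (by omega), rdLoop2_step _ _ _ _ _ (by omega), rdLoop2_step _ _ _ _ _ (by omega), rdLoop2_stop _ _ _ _ (by omega)]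
      norm_num
    have hc : List.countP (fun p => decide (p < r)) ([0, 31, 60, 91, 121, 152, 182, 213, 244, 274, 305, 335] : List Int) = 5 := by
      simp only [List.countP_cons, List.countP_nil, decide_eq_true_eq]
      rw [if_pos (show (0:Int) < r by omega), if_pos (show (31:Int) < r by omega), if_pos (show (60:Int) < r by omega), if_pos (show (91:Int) < r by omega), if_pos (show (121:Int) < r by omega), if_neg (show ¬ ((152:Int) < r) by omega), if_neg (show ¬ ((182:Int) < r) by omega), if_neg (show ¬ ((213:Int) < r) by omega), if_neg (show ¬ ((244:Int) < r) by omega), if_neg (show ¬ ((274:Int) < r) by omega), if_neg (show ¬ ((305:Int) < r) by omega), if_neg (show ¬ ((335:Int) < r) by omega)]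
    simp only [hm, hc]
    rw [show (PySem.List.slice ([31, 29, 31, 30, 31, 30, 31, 31, 30, 31, 30, 31] : List Int) (some 0) (some ((5:Int) - 1))).sum = (121:Int) from by decide,
      show PySem.List.pyGetD ([0, 31, 60, 91, 121, 152, 182, 213, 244, 274, 305, 335] : List Int) (((5:Nat):Int) - 1) 0 = (121:Int) from by decide]
    norm_num
  · have hm : rdLoop2 r [31, 29, 31, 30, 31, 30, 31, 31, 30, 31, 30, 31] 0 0 = (6 : Int) := by
      rw [rdLoop2_step _ _ _ _ _ (by omega), rdLoop2_step _ _ _ _ _ (by omega), rdLoop2_step _ _ _ _ _ (by omega), rdLoop2_step _ _ _ _ _ (by omega), rdLoop2_step _ _ _ _ _ (by omega), rdLoop2_step _ _ _ _ _ (by omega), rdLoop2_stop _ _ _ _ (by omega)]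
      norm_num
    have hc : List.countP (fun p => decide (p < r)) ([0, 31, 60, 91, 121, 152, 182, 213, 244, 274, 305, 335] : List Int) = 6 := by
      simp only [List.countP_cons, List.countP_nil, decide_eq_true_eq]
      rw [if_pos (show (0:Int) < r by omega), if_pos (show (31:Int) < r by omega), if_pos (show (60:Int) < r by omega), if_pos (show (91:Int) < r by omega), if_pos (show (121:Int) < r by omega), if_pos (show (152:Int) < r by omega), if_neg (show ¬ ((182:Int) < r) by omega), if_neg (show ¬ ((213:Int) < r) by omega), if_neg (show ¬ ((244:Int) < r) by omega), if_neg (show ¬ ((274:Int) < r) by omega), if_neg (show ¬ ((305:Int) < r) by omega), if_neg (show ¬ ((335:Int) < r) by omega)]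
    simp only [hm, hc]
    rw [show (PySem.List.slice ([31, 29, 31, 30, 31, 30, 31, 31, 30, 31, 30, 31] : List Int) (some 0) (some ((6:Int) - 1))).sum = (152:Int) from by decide,
      show PySem.List.pyGetD ([0, 31, 60, 91, 121, 152, 182, 213, 244, 274, 305, 335] : List Int) (((6:Nat):Int) - 1) 0 = (152:Int) from by decide]
    norm_num
  · have hm : rdLoop2 r [31, 29, 31, 30, 31, 30, 31, 31, 30, 31, 30, 31] 0 0 = (7 : Int) := by
      rw [rdLoop2_step _ _ _ _ _ (by omega), rdLoop2_step _ _ _ _ _ (by omega), rdLoop2_step _ _ _ _ _ (by omega), rdLoop2_step _ _ _ _ _ (by omega), rdLoop2_step _ _ _ _ _ (by omega), rdLoop2_step _ _ _ _ _ (by omega), rdLoop2_step _ _ _ _ _ (by omega), rdLoop2_stop _ _ _ _ (by omega)]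
      norm_num
    have hc : List.countP (fun p => decide (p < r)) ([0, 31, 60, 91, 121, 152, 182, 213, 244, 274, 305, 335] : List Int) = 7 := by
      simp only [List.countP_cons, List.countP_nil, decide_eq_true_eq]
      rw [if_pos (show (0:Int) < r by omega), if_pos (show (31:Int) < r by omega), if_pos (show (60:Int) < r by omega), if_pos (show (91:Int) < r by omega), if_pos (show (121:Int) < r by omega), if_pos (show (152:Int) < r by omega), if_pos (show (182:Int) < r by omega), if_neg (show ¬ ((213:Int) < r) by omega), if_neg (show ¬ ((244:Int) < r) by omega), if_neg (show ¬ ((274:Int) < r) by omega), if_neg (show ¬ ((305:Int) < r) by omega), if_neg (show ¬ ((335:Int) < r) by omega)]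
    simp only [hm, hc]
    rw [show (PySem.List.slice ([31, 29, 31, 30, 31, 30, 31, 31, 30, 31, 30, 31] : List Int) (some 0) (some ((7:Int) - 1))).sum = (182:Int) from by decide,
      show PySem.List.pyGetD ([0, 31, 60, 91, 121, 152, 182, 213, 244, 274, 305, 335] : List Int) (((7:Nat):Int) - 1) 0 = (182:Int) from by decide]
    norm_num
  · have hm : rdLoop2 r [31, 29, 31, 30, 31, 30, 31, 31, 30, 31, 30, 31] 0 0 = (8 : Int) := by
      rw [rdLoop2_step _ _ _ _ _ (by omega), rdLoop2_step _ _ _ _ _ (by omega), rdLoop2_step _ _ _ _ _ (by omega), rdLoop2_step _ _ _ _ _ (by omega), rdLoop2_step _ _ _ _ _ (by omega), rdLoop2_step _ _ _ _ _ (by omega), rdLoop2_step _ _ _ _ _ (by omega), rdLoop2_step _ _ _ _ _ (by omega), rdLoop2_stop _ _ _ _ (by omega)]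
      norm_num
    have hc : List.countP (fun p => decide (p < r)) ([0, 31, 60, 91, 121, 152, 182, 213, 244, 274, 305, 335] : List Int) = 8 := by
      simp only [List.countP_cons, List.countP_nil, decide_eq_true_eq]
      rw [if_pos (show (0:Int) < r by omega), if_pos (show (31:Int) < r by omega), if_pos (show (60:Int) < r by omega), if_pos (show (91:Int) < r by omega), if_pos (show (121:Int) < r by omega), if_pos (show (152:Int) < r by omega), if_pos (show (182:Int) < r by omega), if_pos (show (213:Int) < r by omega), if_neg (show ¬ ((244:Int) < r) by omega), if_neg (show ¬ ((274:Int) < r) by omega), if_neg (show ¬ ((305:Int) < r) by omega), if_neg (show ¬ ((335:Int) < r) by omega)]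
    simp only [hm, hc]
    rw [show (PySem.List.slice ([31, 29, 31, 30, 31, 30, 31, 31, 30, 31, 30, 31] : List Int) (some 0) (some ((8:Int) - 1))).sum = (213:Int) from by decide,
      show PySem.List.pyGetD ([0, 31, 60, 91, 121, 152, 182, 213, 244, 274, 305, 335] : List Int) (((8:Nat):Int) - 1) 0 = (213:Int) from by decide]
    norm_num
  · have hm : rdLoop2 r [31, 29, 31, 30, 31, 30, 31, 31, 30, 31, 30, 31] 0 0 = (9 : Int) := by
      rw [rdLoop2_step _ _ _ _ _ (by omega), rdLoop2_step _ _ _ _ _ (by omega), rdLoop2_step _ _ _ _ _ (by omega), rdLoop2_step _ _ _ _ _ (by omega), rdLoop2_step _ _ _ _ _ (by omega), rdLoop2_step _ _ _ _ _ (by omega), rdLoop2_step _ _ _ _ _ (by omega), rdLoop2_step _ _ _ _ _ (by omega), rdLoop2_step _ _ _ _ _ (by omega), rdLoop2_stop _ _ _ _ (by omega)]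
      norm_num
    have hc : List.countP (fun p => decide (p < r)) ([0, 31, 60, 91, 121, 152, 182, 213, 244, 274, 305, 335] : List Int) = 9 := by
      simp only [List.countP_cons, List.countP_nil, decide_eq_true_eq]
      rw [if_pos (show (0:Int) < r by omega), if_pos (show (31:Int) < r by omega), if_pos (show (60:Int) < r by omega), if_pos (show (91:Int) < r by omega), if_pos (show (121:Int) < r by omega), if_pos (show (152:Int) < r by omega), if_pos (show (182:Int) < r by omega), if_pos (show (213:Int) < r by omega), if_pos (show (244:Int) < r by omega), if_neg (show ¬ ((274:Int) < r) by omega), if_neg (show ¬ ((305:Int) < r) by omega), if_neg (show ¬ ((335:Int) < r) by omega)]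
    simp only [hm, hc]
    rw [show (PySem.List.slice ([31, 29, 31, 30, 31, 30, 31, 31, 30, 31, 30, 31] : List Int) (some 0) (some ((9:Int) - 1))).sum = (244:Int) from by decide,
      show PySem.List.pyGetD ([0, 31, 60, 91, 121, 152, 182, 213, 244, 274, 305, 335] : List Int) (((9:Nat):Int) - 1) 0 = (244:Int) from by decide]
    norm_num
  · have hm : rdLoop2 r [31, 29, 31, 30, 31, 30, 31, 31, 30, 31, 30, 31] 0 0 = (10 : Int) := by
      rw [rdLoop2_step _ _ _ _ _ (by omega), rdLoop2_step _ _ _ _ _ (by omega), rdLoop2_step _ _ _ _ _ (by omega), rdLoop2_step _ _ _ _ _ (by omega), rdLoop2_step _ _ _ _ _ (by omega), rdLoop2_step _ _ _ _ _ (by omega), rdLoop2_step _ _ _ _ _ (by omega), rdLoop2_step _ _ _ _ _ (by omega), rdLoop2_step _ _ _ _ _ (by omega), rdLoop2_step _ _ _ _ _ (by omega), rdLoop2_stop _ _ _ _ (by omega)]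
      norm_num
    have hc : List.countP (fun p => decide (p < r)) ([0, 31, 60, 91, 121, 152, 182, 213, 244, 274, 305, 335] : List Int) = 10 := by
      simp only [List.countP_cons, List.countP_nil, decide_eq_true_eq]
      rw [if_pos (show (0:Int) < r by omega), if_pos (show (31:Int) < r by omega), if_pos (show (60:Int) < r by omega), if_pos (show (91:Int) < r by omega), if_pos (show (121:Int) < r by omega), if_pos (show (152:Int) < r by omega), if_pos (show (182:Int) < r by omega), if_pos (show (213:Int) < r by omega), if_pos (show (244:Int) < r by omega), if_pos (show (274:Int) < r by omega), if_neg (show ¬ ((305:Int) < r) by omega), if_neg (show ¬ ((335:Int) < r) by omega)]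
    simp only [hm, hc]
    rw [show (PySem.List.slice ([31, 29, 31, 30, 31, 30, 31, 31, 30, 31, 30, 31] : List Int) (some 0) (some ((10:Int) - 1))).sum = (274:Int) from by decide,
      show PySem.List.pyGetD ([0, 31, 60, 91, 121, 152, 182, 213, 244, 274, 305, 335] : List Int) (((10:Nat):Int) - 1) 0 = (274:Int) from by decide]
    norm_num
  · have hm : rdLoop2 r [31, 29, 31, 30, 31, 30, 31, 31, 30, 31, 30, 31] 0 0 = (11 : Int) := by
      rw [rdLoop2_step _ _ _ _ _ (by omega), rdLoop2_step _ _ _ _ _ (by omega), rdLoop2_step _ _ _ _ _ (by omega), rdLoop2_step _ _ _ _ _ (by omega), rdLoop2_step _ _ _ _ _ (by omega), rdLoop2_step _ _ _ _ _ (by omega), rdLoop2_step _ _ _ _ _ (by omega), rdLoop2_step _ _ _ _ _ (by omega), rdLoop2_step _ _ _ _ _ (by omega), rdLoop2_step _ _ _ _ _ (by omega), rdLoop2_step _ _ _ _ _ (by omega), rdLoop2_stop _ _ _ _ (by omega)]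
      norm_num
    have hc : List.countP (fun p => decide (p < r)) ([0, 31, 60, 91, 121, 152, 182, 213, 244, 274, 305, 335] : List Int) = 11 := by
      simp only [List.countP_cons, List.countP_nil, decide_eq_true_eq]
      rw [if_pos (show (0:Int) < r by omega), if_pos (show (31:Int) < r by omega), if_pos (show (60:Int) < r by omega), if_pos (show (91:Int) < r by omega), if_pos (show (121:Int) < r by omega), if_pos (show (152:Int) < r by omega), if_pos (show (182:Int) < r by omega), if_pos (show (213:Int) < r by omega), if_pos (show (244:Int) < r by omega), if_pos (show (274:Int) < r by omega), if_pos (show (305:Int) < r by omega), if_neg (show ¬ ((335:Int) < r) by omega)]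
    simp only [hm, hc]
    rw [show (PySem.List.slice ([31, 29, 31, 30, 31, 30, 31, 31, 30, 31, 30, 31] : List Int) (some 0) (some ((11:Int) - 1))).sum = (305:Int) from by decide,
      show PySem.List.pyGetD ([0, 31, 60, 91, 121, 152, 182, 213, 244, 274, 305, 335] : List Int) (((11:Nat):Int) - 1) 0 = (305:Int) from by decide]
    norm_num
  · have hm : rdLoop2 r [31, 29, 31, 30, 31, 30, 31, 31, 30, 31, 30, 31] 0 0 = (12 : Int) := by
      rw [rdLoop2_step _ _ _ _ _ (by omega), rdLoop2_step _ _ _ _ _ (by omega), rdLoop2_step _ _ _ _ _ (by omega), rdLoop2_step _ _ _ _ _ (by omega), rdLoop2_step _ _ _ _ _ (by omega), rdLoop2_step _ _ _ _ _ (by omega), rdLoop2_step _ _ _ _ _ (by omega), rdLoop2_step _ _ _ _ _ (by omega), rdLoop2_step _ _ _ _ _ (by omega), rdLoop2_step _ _ _ _ _ (by omega), rdLoop2_step _ _ _ _ _ (by omega), rdLoop2_step _ _ _ _ _ (by omega), rdLoop2_stop _ _ _ _ (by omega)]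
      norm_num
    have hc : List.countP (fun p => decide (p < r)) ([0, 31, 60, 91, 121, 152, 182, 213, 244, 274, 305, 335] : List Int) = 12 := by
      simp only [List.countP_cons, List.countP_nil, decide_eq_true_eq]
      rw [if_pos (show (0:Int) < r by omega), if_pos (show (31:Int) < r by omega), if_pos (show (60:Int) < r by omega), if_pos (show (91:Int) < r by omega), if_pos (show (121:Int) < r by omega), if_pos (show (152:Int) < r by omega), if_pos (show (182:Int) < r by omega), if_pos (show (213:Int) < r by omega), if_pos (show (244:Int) < r by omega), if_pos (show (274:Int) < r by omega), if_pos (show (305:Int) < r by omega), if_pos (show (335:Int) < r by omega)]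
    simp only [hm, hc]
    rw [show (PySem.List.slice ([31, 29, 31, 30, 31, 30, 31, 31, 30, 31, 30, 31] : List Int) (some 0) (some ((12:Int) - 1))).sum = (335:Int) from by decide,
      show PySem.List.pyGetD ([0, 31, 60, 91, 121, 152, 182, 213, 244, 274, 305, 335] : List Int) (((12:Nat):Int) - 1) 0 = (335:Int) from by decide]
    norm_num

lemma rdLoop2_nonpos (r : Int) (dbm : List Int) (h : r ≤ 0) : rdLoop2 r dbm 0 0 = 0 := by
  unfold rdLoop2
  rw [if_neg (by omega : ¬ (0 : Int) < r)]

lemma tailsA_nonpos (r : Int) (dbm : List Int) (h : r ≤ 0) :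
    tailsA r dbm = (r - (PySem.List.slice dbm (some 0) (some (-1))).sum, 0) := by
  unfold tailsA
  rw [rdLoop2_nonpos r dbm h]
  norm_num

lemma tailsB_nonpos (r : Int) (P : List Int) (h : r ≤ 0) (hP : ∀ p ∈ P, 0 ≤ p) :
    tailsB r P = (r - PySem.List.pyGetD P (-1) 0, 0) := by
  unfold tailsB
  have hcount : P.countP (fun p => decide (p < r)) = 0 := by
    rw [List.countP_eq_zero]
    intro p hp
    have := hP p hp
    simp only [decide_eq_true_eq]
    omega
  rw [hcount]
  norm_num

lemma tails_eq (r : Int) (leap : Bool) (h2 : r ≤ 365 + (if leap then 1 else 0)) :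
    tailsA r (if leap then [31, 29, 31, 30, 31, 30, 31, 31, 30, 31, 30, 31] else cdDaysByMonths)
      = tailsB r (if leap then prefLeap else prefNonLeap) := by
  by_cases hr : r ≤ 0
  · cases leap
    · simp only [Bool.false_eq_true, if_false]
      rw [tailsA_nonpos _ _ hr, tailsB_nonpos _ _ hr (by decide)]
      norm_num [show (PySem.List.slice cdDaysByMonths none (some (-1))).sum = (334 : Int) from by decide,
        show PySem.List.pyGetD prefNonLeap (-1) 0 = (334 : Int) from by decide]
    · simp only [if_true]
      rw [tailsA_nonpos _ _ hr, tailsB_nonpos _ _ hr (by decide)]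
      norm_num [show (PySem.List.slice ([31, 29, 31, 30, 31, 30, 31, 31, 30, 31, 30, 31] : List Int) none (some (-1))).sum = (335 : Int) from by decide,
        show PySem.List.pyGetD prefLeap (-1) 0 = (335 : Int) from by decide]
  · replace hr : 0 < r := by omega
    cases leap
    · simp only [Bool.false_eq_true, if_false] at h2 ⊢
      exact tails_nonleap r hr (by omega)
    · simp only [if_true] at h2 ⊢
      exact tails_leap r hr (by omega)

lemma r_bound (n : Int) (hn : n ≠ 0) :
    n - ((TY n - 2000) * 365 + PySem.Int.floordiv (TY n - 2000) 4 + (if TY n > 2000 then 1 else 0))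
      ≤ 365 + (if PySem.Int.mod (TY n) 4 = 0 then 1 else 0) := by
  have h := fdiv1461 n
  have hF := FY_TY_ge n
  rw [PySem.Int.floordiv_eq_ediv_of_pos (show (0 : Int) < 4 by norm_num),
    PySem.Int.mod_eq_emod_of_pos (show (0 : Int) < 4 by norm_num)]
  unfold FY at hF
  unfold TY at hF ⊢
  rcases le_total (PySem.Int.floordiv (4 * n + 1457) 1461) 0 with h0 | h0
  · rw [max_eq_left h0] at hF ⊢
    have hlink : (1999 + (0:Int)) / 4 = (1999 + (0:Int) - 2000) / 4 + 500 := by omega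
    split_ifs <;> omega
  · rw [max_eq_right h0] at hF ⊢
    have hlink : (1999 + PySem.Int.floordiv (4 * n + 1457) 1461) / 4
        = (1999 + PySem.Int.floordiv (4 * n + 1457) 1461 - 2000) / 4 + 500 := by omega
    split_ifs <;> omega

/-- the heart of the equivalence: on every nonzero day-number the loop-based reverseDate
agrees with the closed-form fromNumB (at 0 Python's reverseDate would raise IndexError;
0 is never a holiday day-number). -/
lemma rev_eq (n : Int) (hn : n ≠ 0) : reverseDate n = fromNumB n := by
  unfold reverseDate fromNumB
  simp only [loop1_eq n, yearB_eq n]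
  have hrb := r_bound n hn
  by_cases hleap : PySem.Int.mod (TY n) 4 = 0
  · rw [if_pos hleap, if_pos hleap]
    rw [if_pos hleap] at hrb
    have ht := tails_eq (n - ((TY n - 2000) * 365 + PySem.Int.floordiv (TY n - 2000) 4
        + (if TY n > 2000 then 1 else 0))) true (by simpa using hrb)
    simp only [if_true] at ht
    unfold tailsA tailsB at ht
    simp only [Prod.mk.injEq] at ht
    simp only [Prod.mk.injEq]
    exact ⟨ht.1, ht.2, trivial⟩
  · rw [if_neg hleap, if_neg hleap]
    rw [if_neg hleap] at hrb
    have ht := tails_eq (n - ((TY n - 2000) * 365 + PySem.Int.floordiv (TY n - 2000) 4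
        + (if TY n > 2000 then 1 else 0))) false (by simpa using hrb)
    simp only [Bool.false_eq_true, if_false] at ht
    unfold tailsA tailsB at ht
    simp only [Prod.mk.injEq] at ht
    simp only [Prod.mk.injEq]
    exact ⟨ht.1, ht.2, trivial⟩

lemma conv_eq (d m y : Int) (h1 : 1 ≤ m) (h2 : m ≤ 12) : convertDate (d, m, y) = toNumB d m y := by
  have hs : (PySem.List.slice cdDaysByMonths (some 0) (some (m - 1))).sum
      = PySem.List.pyGetD prefNonLeap (m - 1) 0 := by
    interval_cases m <;> decide
  simp only [convertDate, toNumB]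
  rw [hs]

lemma h_bounds (f g : Int) (hf : 0 ≤ f ∧ f < 19) (hg : 0 ≤ g ∧ g < 30) :
    0 ≤ PySem.Int.floordiv (f + 11 * g) 319 ∧ PySem.Int.floordiv (f + 11 * g) 319 ≤ 1 := by
  rw [PySem.Int.floordiv_eq_ediv_of_pos (by norm_num)]
  omega

lemma easter_n_bounds (g h m : Int) (hg : 0 ≤ g ∧ g < 30) (hh : 0 ≤ h ∧ h ≤ 1) (hm : 0 ≤ m ∧ m < 7) :
    3 ≤ PySem.Int.floordiv (g - h + m + 114) 31 ∧ PySem.Int.floordiv (g - h + m + 114) 31 ≤ 4 := by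
  rw [PySem.Int.floordiv_eq_ediv_of_pos (by norm_num)]
  omega

lemma paques_bounds (an : Int) : 3 ≤ (datePaques an).2.1 ∧ (datePaques an).2.1 ≤ 4 := by
  unfold datePaques
  simp only []
  exact easter_n_bounds _ _ _
    ⟨PySem.Int.mod_nonneg _ (by norm_num), PySem.Int.mod_lt _ (by norm_num)⟩
    (h_bounds _ _
      ⟨PySem.Int.mod_nonneg _ (by norm_num), PySem.Int.mod_lt _ (by norm_num)⟩
      ⟨PySem.Int.mod_nonneg _ (by norm_num), PySem.Int.mod_lt _ (by norm_num)⟩)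
    ⟨PySem.Int.mod_nonneg _ (by norm_num), PySem.Int.mod_lt _ (by norm_num)⟩

lemma modp1_bounds (X : Int) : 1 ≤ PySem.Int.mod X 31 + 1 ∧ PySem.Int.mod X 31 + 1 ≤ 31 := by
  have h1 := PySem.Int.mod_nonneg X (show (0:Int) < 31 by norm_num)
  have h2 := PySem.Int.mod_lt X (show (0:Int) < 31 by norm_num)
  omega

lemma paques_day_bounds (an : Int) : 1 ≤ (datePaques an).1 ∧ (datePaques an).1 ≤ 31 := by
  unfold datePaques
  simp only []
  exact modp1_bounds _

/-- the base day-number of year `an` (offset of its Jan 1 minus one). -/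
def baseExpr (an : Int) : Int :=
  (an - 2000) * 365 + PySem.Int.floordiv (an - 2000) 4 + (if an > 2000 then 1 else 0)

lemma base_sign (an : Int) : 0 ≤ baseExpr an ∨ baseExpr an ≤ -366 := by
  unfold baseExpr
  rw [PySem.Int.floordiv_eq_ediv_of_pos (by norm_num)]
  split_ifs <;> omega

lemma elt_ne_zero (an v : Int) (h1 : 1 ≤ v - baseExpr an) (h2 : v - baseExpr an ≤ 365) : v ≠ 0 := by
  have := base_sign an
  omega

lemma toNumB_offset (d m y : Int) :
    toNumB d m y = baseExpr y + PySem.List.pyGetD prefNonLeap (m - 1) 0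
      + (if PySem.Int.mod y 4 = 0 ∧ m > 2 then 1 else 0) + d := by
  unfold toNumB baseExpr
  ring

lemma toNumB_fixed_ne (an d m : Int)
    (hlo : 1 ≤ PySem.List.pyGetD prefNonLeap (m - 1) 0 + d)
    (hhi : PySem.List.pyGetD prefNonLeap (m - 1) 0 + d ≤ 364) : toNumB d m an ≠ 0 := by
  apply elt_ne_zero an
  · rw [toNumB_offset]; split_ifs <;> omega
  · rw [toNumB_offset]; split_ifs <;> omega

lemma paques_ne (an jour mois off : Int) (hm : 3 ≤ mois ∧ mois ≤ 4)
    (hd : 1 ≤ jour ∧ jour ≤ 31) (hoff : 0 ≤ off ∧ off ≤ 50) :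
    toNumB jour mois an + off ≠ 0 := by
  have hc : PySem.List.pyGetD prefNonLeap (mois - 1) 0 = 59 ∨
      PySem.List.pyGetD prefNonLeap (mois - 1) 0 = 90 := by
    have h3 : mois = 3 ∨ mois = 4 := by omega
    rcases h3 with h3 | h3 <;> rw [h3]
    · left; decide
    · right; decide
  apply elt_ne_zero an
  · rw [toNumB_offset]; rcases hc with hc | hc <;> rw [hc] <;> split_ifs <;> omega
  · rw [toNumB_offset]; rcases hc with hc | hc <;> rw [hc] <;> split_ifs <;> omega

-- ===== VERDICT =====
theorem joursFeries_spec : Claim_equal_joursFeries := by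
  intro an _
  unfold Spec_joursFeries joursFeries joursFeries_alt
  have hE : easterB = datePaques := rfl
  rw [hE]
  have hmb := paques_bounds an
  have hdb := paques_day_bounds an
  rcases hDP : datePaques an with ⟨jour, mois, yr⟩
  have hyr : an = yr := congrArg (fun t => t.2.2) hDP
  rw [hDP] at hmb hdb
  dsimp only at hmb hdb
  dsimp only
  rw [← hyr]
  rw [conv_eq jour mois an (by omega) (by omega),
    conv_eq 1 1 an (by norm_num) (by norm_num),
    conv_eq 1 5 an (by norm_num) (by norm_num),
    conv_eq 8 5 an (by norm_num) (by norm_num),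
    conv_eq 14 7 an (by norm_num) (by norm_num),
    conv_eq 15 8 an (by norm_num) (by norm_num),
    conv_eq 1 11 an (by norm_num) (by norm_num),
    conv_eq 11 11 an (by norm_num) (by norm_num),
    conv_eq 25 12 an (by norm_num) (by norm_num)]
  apply List.map_congr_left
  intro x hx
  apply rev_eq
  have hx' := (PySem.List.sorted_perm _ (fun x => x) false).mem_iff.mp hx
  simp only [List.mem_cons, List.not_mem_nil, or_false] at hx'
  rcases hx' with rfl | rfl | rfl | rfl | rfl | rfl | rfl | rfl | rfl | rfl | rfl
  · exact paques_ne an jour mois 1 hmb hdb (by norm_num)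
  · exact paques_ne an jour mois 39 hmb hdb (by norm_num)
  · exact paques_ne an jour mois 50 hmb hdb (by norm_num)
  · exact toNumB_fixed_ne an 1 1 (by decide) (by decide)
  · exact toNumB_fixed_ne an 1 5 (by decide) (by decide)
  · exact toNumB_fixed_ne an 8 5 (by decide) (by decide)
  · exact toNumB_fixed_ne an 14 7 (by decide) (by decide)
  · exact toNumB_fixed_ne an 15 8 (by decide) (by decide)
  · exact toNumB_fixed_ne an 1 11 (by decide) (by decide)
  · exact toNumB_fixed_ne an 11 11 (by decide) (by decide)
  · exact toNumB_fixed_ne an 25 12 (by decide) (by decide)
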